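-- pv_equiv track=rewrite | github.com/Leedefend/sce-backend-odoo | scripts/verify/scene_inventory_draft_diff_report.py | _build_diff_rows
-- ===== SOURCE A (Python) =====
-- REQUIRED_COLUMNS = [
--     "scene_key",
--     "name",
--     "domain",
--     "route_target",
--     "nav_group",
--     "maturity_level",
--     "owner_module",
--     "next_action",
-- ]
--
-- FOCUS_DIFF_FIELDS = ("maturity_level", "owner_module", "next_action")
--
-- def _safe_text(value) -> str:
--     return str(value or "").strip()
--
-- def _build_diff_rows(current: dict[str, dict[str, str]], draft: dict[str, dict[str, str]]) -> tuple[list[str], list[str], list[dict], list[dict]]: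
--     current_keys = set(current.keys())
--     draft_keys = set(draft.keys())
--     added = sorted(draft_keys - current_keys)
--     removed = sorted(current_keys - draft_keys)
--
--     changed: list[dict] = []
--     focus_changed: list[dict] = []
--     shared = sorted(current_keys & draft_keys)
--     for scene_key in shared:
--         old = current.get(scene_key) or {}
--         new = draft.get(scene_key) or {}
--         for field in REQUIRED_COLUMNS[1:]:
--             old_value = _safe_text(old.get(field))
--             new_value = _safe_text(new.get(field))
--             if old_value == new_value:
--                 continue
--             row = {
--                 "scene_key": scene_key,
--                 "field": field,
--                 "old": old_value,
--                 "new": new_value,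
--             }
--             changed.append(row)
--             if field in FOCUS_DIFF_FIELDS:
--                 focus_changed.append(row)
--     return added, removed, changed, focus_changed
-- ===== SOURCE B (Python) =====
-- REQUIRED_COLUMNS = [
--     "scene_key",
--     "name",
--     "domain",
--     "route_target",
--     "nav_group",
--     "maturity_level",
--     "owner_module",
--     "next_action",
-- ]
--
-- FOCUS_DIFF_FIELDS = ("maturity_level", "owner_module", "next_action")
--
-- def _safe_text(value) -> str:
--     return str(value or "").strip()
--
-- def _build_diff_rows(current: dict[str, dict[str, str]], draft: dict[str, dict[str, str]]) -> tuple[list[str], list[str], list[dict], list[dict]]: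
--     # Sort each key list once, then classify every key in a single two-pointer
--     # merge over the two sorted lists: a key only in `current` is removed, only
--     # in `draft` is added, and a key in both is diffed field by field on the spot.
--     ck = sorted(current)
--     dk = sorted(draft)
--     added: list[str] = []
--     removed: list[str] = []
--     changed: list[dict] = []
--     focus_changed: list[dict] = []
--     i = j = 0
--     while i < len(ck) or j < len(dk):
--         if j >= len(dk) or (i < len(ck) and ck[i] < dk[j]):
--             removed.append(ck[i])
--             i += 1
--         elif i >= len(ck) or dk[j] < ck[i]:
--             added.append(dk[j])
--             j += 1
--         else:
--             scene_key = ck[i]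
--             old = current.get(scene_key) or {}
--             new = draft.get(scene_key) or {}
--             for field in REQUIRED_COLUMNS[1:]:
--                 old_value = _safe_text(old.get(field))
--                 new_value = _safe_text(new.get(field))
--                 if old_value != new_value:
--                     row = {
--                         "scene_key": scene_key,
--                         "field": field,
--                         "old": old_value,
--                         "new": new_value,
--                     }
--                     changed.append(row)
--                     if field in FOCUS_DIFF_FIELDS:
--                         focus_changed.append(row)
--             i += 1
--             j += 1
--     return added, removed, changed, focus_changed
-- ===== Notes on version B (the rewrite author's own statement) =====
-- stated objective: alternative
-- what changed: A's three set-algebra passes (difference, difference, intersection, each re-sorted) are replaced by sorting each key list once and classifying every key in a single two-pointer merge of the two sorted lists, diffing shared keys on the spot.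
import Mathlib
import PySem

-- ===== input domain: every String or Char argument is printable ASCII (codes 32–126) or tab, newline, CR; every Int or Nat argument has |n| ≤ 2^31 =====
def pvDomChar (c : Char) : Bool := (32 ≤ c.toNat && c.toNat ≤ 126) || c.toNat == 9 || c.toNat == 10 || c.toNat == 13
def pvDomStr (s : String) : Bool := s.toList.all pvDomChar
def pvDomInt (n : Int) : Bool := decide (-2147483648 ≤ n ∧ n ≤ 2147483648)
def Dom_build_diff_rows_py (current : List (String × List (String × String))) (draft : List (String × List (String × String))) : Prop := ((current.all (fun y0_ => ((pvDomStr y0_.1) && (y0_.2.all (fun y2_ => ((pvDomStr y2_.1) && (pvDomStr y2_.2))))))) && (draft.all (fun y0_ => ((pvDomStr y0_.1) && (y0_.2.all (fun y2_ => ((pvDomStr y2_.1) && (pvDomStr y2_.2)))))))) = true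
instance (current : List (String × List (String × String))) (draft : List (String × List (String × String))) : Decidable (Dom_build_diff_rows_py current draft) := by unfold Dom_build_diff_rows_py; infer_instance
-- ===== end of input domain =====

-- B replaces A's set algebra plus three sorted passes by one two-pointer merge of the two sorted key lists (alternative decomposition, same cost).

-- module constants (shared by both versions of the Python module)
def pvRequiredColumns : List String :=
  ["scene_key", "name", "domain", "route_target", "nav_group", "maturity_level", "owner_module", "next_action"]
def pvFocusDiffFields : List String := ["maturity_level", "owner_module", "next_action"]
-- _safe_text(value) for a str-or-None argument: str(value or "").strip()
def pvSafe (o : Option String) : String := PySem.Str.strip (o.getD "")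

-- ===== PORT A =====
def build_diff_rows_py (current : List (String × List (String × String))) (draft : List (String × List (String × String))) : List String × List String × (List (List (String × String))) × (List (List (String × String))) :=
  let cur : PySem.Dict String (List (String × String)) := PySem.Dict.ofList current
  let dr : PySem.Dict String (List (String × String)) := PySem.Dict.ofList draft
  let current_keys := PySem.Set.ofList (PySem.Dict.keys cur)
  let draft_keys := PySem.Set.ofList (PySem.Dict.keys dr)
  let added := PySem.List.sorted (PySem.Set.diff draft_keys current_keys) (fun x => x) false
  let removed := PySem.List.sorted (PySem.Set.diff current_keys draft_keys) (fun x => x) false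
  let shared := PySem.List.sorted (PySem.Set.inter current_keys draft_keys) (fun x => x) false
  -- for scene_key in shared: for field in REQUIRED_COLUMNS[1:]: append to changed / focus_changed
  let res := shared.foldl (fun (acc : List (List (String × String)) × List (List (String × String))) scene_key =>
    let old := (cur.get? scene_key).getD []      -- current.get(scene_key) or {}  ('or {}' only replaces None/empty by empty: exact)
    let nw := (dr.get? scene_key).getD []
    (pvRequiredColumns.drop 1).foldl (fun acc field =>
      let old_value := pvSafe ((PySem.Dict.ofList old).get? field)
      let new_value := pvSafe ((PySem.Dict.ofList nw).get? field)
      if old_value == new_value then acc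
      else
        let row := [("scene_key", scene_key), ("field", field), ("old", old_value), ("new", new_value)]
        (acc.1 ++ [row], if pvFocusDiffFields.contains field then acc.2 ++ [row] else acc.2)) acc) ([], [])
  (added, removed, res.1, res.2)

-- ===== PORT B =====
-- inner body of Source B's shared-key branch: diff one scene_key into the (changed, focus_changed) accumulators
def pvInnerB (cur dr : PySem.Dict String (List (String × String))) (scene_key : String)
    (acc : List (List (String × String)) × List (List (String × String))) :
    List (List (String × String)) × List (List (String × String)) :=
  let old := (cur.get? scene_key).getD []      -- current.get(scene_key) or {}  (exact: see port A)
  let nw := (dr.get? scene_key).getD []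
  (pvRequiredColumns.drop 1).foldl (fun acc field =>
    let old_value := pvSafe ((PySem.Dict.ofList old).get? field)
    let new_value := pvSafe ((PySem.Dict.ofList nw).get? field)
    if old_value == new_value then acc
    else
      let row := [("scene_key", scene_key), ("field", field), ("old", old_value), ("new", new_value)]
      (acc.1 ++ [row], if pvFocusDiffFields.contains field then acc.2 ++ [row] else acc.2)) acc

-- Source B's while loop: two-pointer merge over the two sorted key lists, carrying (added, removed, changed, focus_changed)
def pvMergeB (cur dr : PySem.Dict String (List (String × String))) :
    List String → List String →
    List String × List String × (List (List (String × String))) × (List (List (String × String))) →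
    List String × List String × (List (List (String × String))) × (List (List (String × String)))
  | [], [], acc => acc
  | x :: xs, [], acc => pvMergeB cur dr xs [] (acc.1, acc.2.1 ++ [x], acc.2.2)
  | [], y :: ys, acc => pvMergeB cur dr [] ys (acc.1 ++ [y], acc.2)
  | x :: xs, y :: ys, acc =>
    if x < y then pvMergeB cur dr xs (y :: ys) (acc.1, acc.2.1 ++ [x], acc.2.2)
    else if y < x then pvMergeB cur dr (x :: xs) ys (acc.1 ++ [y], acc.2)
    else
      let r := pvInnerB cur dr x acc.2.2
      pvMergeB cur dr xs ys (acc.1, acc.2.1, r)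
termination_by ck dk _ => ck.length + dk.length

def build_diff_rows_py_alt (current : List (String × List (String × String))) (draft : List (String × List (String × String))) : List String × List String × (List (List (String × String))) × (List (List (String × String))) :=
  let cur : PySem.Dict String (List (String × String)) := PySem.Dict.ofList current
  let dr : PySem.Dict String (List (String × String)) := PySem.Dict.ofList draft
  let ck := PySem.List.sorted (PySem.Dict.keys cur) (fun x => x) false
  let dk := PySem.List.sorted (PySem.Dict.keys dr) (fun x => x) false
  pvMergeB cur dr ck dk ([], [], [], [])

-- ===== PRECONDITION & SPEC =====
def Spec_build_diff_rows_py (current : List (String × List (String × String))) (draft : List (String × List (String × String))) (out : List String × List String × (List (List (String × String))) × (List (List (String × String)))) : Prop := out = build_diff_rows_py_alt current draft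
instance (current : List (String × List (String × String))) (draft : List (String × List (String × String))) (out : List String × List String × (List (List (String × String))) × (List (List (String × String)))) : Decidable (Spec_build_diff_rows_py current draft out) := by unfold Spec_build_diff_rows_py; infer_instance

-- ===== CLAIM =====
def Claim_equal_build_diff_rows_py : Prop := ∀ (current : List (String × List (String × String))) (draft : List (String × List (String × String))), Dom_build_diff_rows_py current draft → Spec_build_diff_rows_py current draft (build_diff_rows_py current draft)

-- ===== LEMMAS AND PROOFS =====

-- Pairwise ≤ plus Nodup gives Pairwise <
theorem pvPairwiseLt {l : List String} (h1 : l.Pairwise (· ≤ ·)) (h2 : l.Nodup) :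
    l.Pairwise (· < ·) :=
  (h1.and h2).imp (fun h => lt_of_le_of_ne h.1 h.2)

-- sorted list of the keys of a dict built from a raw list is strictly increasing
theorem pvSortedKeysLt (l : List (String × List (String × String))) :
    (PySem.List.sorted (PySem.Dict.keys (PySem.Dict.ofList l)) (fun x => x) false).Pairwise (· < ·) :=
  pvPairwiseLt (PySem.List.sorted_pairwise _ _)
    (((PySem.List.sorted_perm _ _ _).nodup_iff).mpr (PySem.Dict.nodup_keys_ofList l))

-- filtering by membership in (w :: R) equals filtering by membership in R when w is not in the filtered list
theorem pvFilterConsNeg (L R : List String) (w : String) (h : ∀ z ∈ L, ¬ z = w) :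
    L.filter (fun z => !((w :: R).contains z)) = L.filter (fun z => !(R.contains z)) := by
  apply List.filter_congr; intro z hz; simp [h z hz]

theorem pvFilterConsPos (L R : List String) (w : String) (h : ∀ z ∈ L, ¬ z = w) :
    L.filter (fun z => ((w :: R).contains z)) = L.filter (fun z => (R.contains z)) := by
  apply List.filter_congr; intro z hz; simp [h z hz]

-- closed form of Source B's merge loop, for strictly increasing key lists
theorem pvMergeB_closed (cur dr : PySem.Dict String (List (String × String)))
    (ck dk : List String) (hc : ck.Pairwise (· < ·)) (hd : dk.Pairwise (· < ·))
    (acc : List String × List String × (List (List (String × String))) × (List (List (String × String)))) :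
    pvMergeB cur dr ck dk acc =
      (acc.1 ++ dk.filter (fun y => !ck.contains y),
       acc.2.1 ++ ck.filter (fun x => !dk.contains x),
       (ck.filter (fun x => dk.contains x)).foldl (fun a k => pvInnerB cur dr k a) acc.2.2) := by
  induction ck, dk, acc using pvMergeB.induct cur dr with
  | case1 acc => simp [pvMergeB]
  | case2 x xs acc ih =>
    rw [pvMergeB, ih (hc.sublist (List.sublist_cons_self x xs)) hd]
    simp
  | case3 y ys acc ih =>
    rw [pvMergeB, ih hc (hd.sublist (List.sublist_cons_self y ys))]
    simp
  | case4 x xs y ys acc hxy ih =>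
    have hxall : ∀ z ∈ y :: ys, x < z := by
      intro z hz
      rcases List.mem_cons.mp hz with rfl | hz
      · exact hxy
      · exact lt_trans hxy (List.rel_of_pairwise_cons hd hz)
    have hne : ∀ z ∈ y :: ys, ¬ z = x := fun z hz h => lt_irrefl x (h ▸ hxall z hz)
    have hxnot : (y :: ys).contains x = false := by
      simp only [List.contains_eq_mem, decide_eq_false_iff_not]
      intro hx; exact lt_irrefl x (hxall x hx)
    rw [pvMergeB, if_pos hxy, ih (hc.sublist (List.sublist_cons_self x xs)) hd,
      pvFilterConsNeg _ _ _ hne]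
    have hxny : ¬ x = y := ne_of_lt hxy
    have hxys : x ∉ ys := fun h => lt_irrefl x (hxall x (List.mem_cons_of_mem _ h))
    simp [List.filter_cons, List.append_assoc, hxny, hxys]
  | case5 x xs y ys acc hxy hyx ih =>
    have hyall : ∀ z ∈ x :: xs, y < z := by
      intro z hz
      rcases List.mem_cons.mp hz with rfl | hz
      · exact hyx
      · exact lt_trans hyx (List.rel_of_pairwise_cons hc hz)
    have hne : ∀ z ∈ x :: xs, ¬ z = y := fun z hz h => lt_irrefl y (h ▸ hyall z hz)
    have hynot : (x :: xs).contains y = false := by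
      simp only [List.contains_eq_mem, decide_eq_false_iff_not]
      intro hy; exact lt_irrefl y (hyall y hy)
    rw [pvMergeB, if_neg hxy, if_pos hyx, ih hc (hd.sublist (List.sublist_cons_self y ys)),
      pvFilterConsNeg _ _ _ hne, pvFilterConsPos _ _ _ hne]
    have hynx : ¬ y = x := ne_of_lt hyx
    have hyxs : y ∉ xs := fun h => lt_irrefl y (hyall y (List.mem_cons_of_mem _ h))
    simp [List.filter_cons, List.append_assoc, hynx, hyxs]
  | case6 x xs y ys acc hxy hyx r ih =>
    have hEq : y = x := le_antisymm (not_lt.mp hxy) (not_lt.mp hyx)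
    subst hEq
    have hne1 : ∀ z ∈ ys, ¬ z = y := fun z hz h =>
      lt_irrefl y (h ▸ List.rel_of_pairwise_cons hd hz)
    have hne2 : ∀ z ∈ xs, ¬ z = y := fun z hz h =>
      lt_irrefl y (h ▸ List.rel_of_pairwise_cons hc hz)
    have hyin : ((y :: ys).contains y) = true := by simp
    rw [pvMergeB, if_neg hxy, if_neg hyx,
      ih (hc.sublist (List.sublist_cons_self y xs)) (hd.sublist (List.sublist_cons_self y ys))]
    rw [show ((y :: ys).filter (fun z => !((y :: xs).contains z)))
          = ys.filter (fun z => !(xs.contains z)) by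
        rw [List.filter_cons]; simp only [List.contains_cons, BEq.rfl, Bool.true_or,
          Bool.not_true, Bool.false_eq_true, if_false]; exact pvFilterConsNeg _ _ _ hne1]
    rw [show ((y :: xs).filter (fun z => !((y :: ys).contains z)))
          = xs.filter (fun z => !(ys.contains z)) by
        rw [List.filter_cons]; simp only [hyin, Bool.not_true, Bool.false_eq_true, if_false]
        exact pvFilterConsNeg _ _ _ hne2]
    rw [show ((y :: xs).filter (fun z => ((y :: ys).contains z)))
          = y :: xs.filter (fun z => (ys.contains z)) by
        rw [List.filter_cons]; simp only [hyin, if_true]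
        rw [pvFilterConsPos _ _ _ hne2]]
    simp [List.foldl_cons]
    rfl

-- A's sorted set-difference is the merge's filter of the sorted key list
theorem pvDiffEq (c d : List (String × List (String × String))) :
    PySem.List.sorted (PySem.Set.diff (PySem.Set.ofList (PySem.Dict.keys (PySem.Dict.ofList d))) (PySem.Set.ofList (PySem.Dict.keys (PySem.Dict.ofList c)))) (fun x => x) false
    = (PySem.List.sorted (PySem.Dict.keys (PySem.Dict.ofList d)) (fun x => x) false).filter
        (fun y => !(PySem.List.sorted (PySem.Dict.keys (PySem.Dict.ofList c)) (fun x => x) false).contains y) := by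
  apply PySem.List.sorted_eq_of_perm_of_pairwise_lt
  · apply (List.perm_ext_iff_of_nodup (((((PySem.List.sorted_perm _ _ _)).nodup_iff).mpr
      (PySem.Dict.nodup_keys_ofList d)).filter _)
      (PySem.Set.nodup_diff _ _ (PySem.Set.nodup_ofList _))).mpr
    intro x
    simp [PySem.Set.mem_diff, PySem.Set.mem_ofList, List.mem_filter,
      PySem.List.mem_sorted, List.contains_eq_mem]
  · exact (pvSortedKeysLt d).filter _

theorem pvInterEq (c d : List (String × List (String × String))) :
    PySem.List.sorted (PySem.Set.inter (PySem.Set.ofList (PySem.Dict.keys (PySem.Dict.ofList c))) (PySem.Set.ofList (PySem.Dict.keys (PySem.Dict.ofList d)))) (fun x => x) false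
    = (PySem.List.sorted (PySem.Dict.keys (PySem.Dict.ofList c)) (fun x => x) false).filter
        (fun x => (PySem.List.sorted (PySem.Dict.keys (PySem.Dict.ofList d)) (fun x => x) false).contains x) := by
  apply PySem.List.sorted_eq_of_perm_of_pairwise_lt
  · apply (List.perm_ext_iff_of_nodup (((((PySem.List.sorted_perm _ _ _)).nodup_iff).mpr
      (PySem.Dict.nodup_keys_ofList c)).filter _)
      (PySem.Set.nodup_inter _ _ (PySem.Set.nodup_ofList _))).mpr
    intro x
    simp [PySem.Set.mem_inter, PySem.Set.mem_ofList, List.mem_filter,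
      PySem.List.mem_sorted, List.contains_eq_mem]
  · exact (pvSortedKeysLt c).filter _

-- ===== VERDICT =====
theorem build_diff_rows_py_spec : Claim_equal_build_diff_rows_py := by
  intro current draft _
  unfold Spec_build_diff_rows_py build_diff_rows_py build_diff_rows_py_alt
  simp only
  rw [pvMergeB_closed _ _ _ _ (pvSortedKeysLt current) (pvSortedKeysLt draft)]
  rw [pvDiffEq current draft, pvDiffEq draft current, pvInterEq current draft]
  rfl
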